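-- pv_equiv track=rewrite | github.com/JerryLookupU/deepseallm_baseline | data_process/deepseaetl.py | pre_last_index
-- ===== SOURCE A (Python) =====
-- def pre_last_index(data, base_state=7):
--     pre_index = -1
--     pre_value = base_state
--     wait_for_base = False
--     for i, value in data.items():
--         if not wait_for_base:
--             if value <= base_state:
--                 wait_for_base = True
--         if (value > base_state) and wait_for_base:
--             # 回落之后 重新达到峰值
--             return i
--     return pre_index
-- ===== SOURCE B (Python) =====
-- def pre_last_index(data, base_state=7):
--     items = list(data.items())
--     n = len(items)
--     # pmin[k] = minimum of the first k values, seeded above base_state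
--     pmin = [base_state + 1] * (n + 1)
--     for k in range(n):
--         pmin[k + 1] = min(pmin[k], items[k][1])
--     return next((i for k, (i, v) in enumerate(items)
--                  if v > base_state and pmin[k] <= base_state), -1)
-- ===== Notes on version B (the rewrite author's own statement) =====
-- stated objective: alternative
-- what changed: Replaced A's stateful flag loop by a prefix-minimum array plus a declarative search: the answer is the first key whose value exceeds base_state and whose preceding prefix minimum is <= base_state.
import Mathlib
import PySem

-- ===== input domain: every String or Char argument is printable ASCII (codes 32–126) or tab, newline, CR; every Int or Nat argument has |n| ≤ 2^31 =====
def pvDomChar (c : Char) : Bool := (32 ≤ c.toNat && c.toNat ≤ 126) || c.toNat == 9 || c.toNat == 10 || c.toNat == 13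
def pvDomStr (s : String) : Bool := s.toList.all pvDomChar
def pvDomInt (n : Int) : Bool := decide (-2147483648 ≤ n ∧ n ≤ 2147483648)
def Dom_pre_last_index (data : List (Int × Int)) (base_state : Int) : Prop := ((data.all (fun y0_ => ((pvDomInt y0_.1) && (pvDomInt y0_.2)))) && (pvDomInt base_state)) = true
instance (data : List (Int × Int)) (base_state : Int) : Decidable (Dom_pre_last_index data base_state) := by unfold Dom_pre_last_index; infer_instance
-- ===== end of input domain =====

-- B replaces A's stateful flag loop by a prefix-minimum array plus a declarative search; same O(n) cost, different decomposition.
-- ===== PORT A =====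
-- A's loop: the state is the wait_for_base flag
def pre_last_index_loop (base_state : Int) (wait_for_base : Bool) : List (Int × Int) → Int
  | [] => -1
  | (i, value) :: rest =>
    let w := if (!wait_for_base) && decide (value ≤ base_state) then true else wait_for_base
    if decide (value > base_state) && w then i else pre_last_index_loop base_state w rest

def pre_last_index (data : List (Int × Int)) (base_state : Int) : Int :=
  pre_last_index_loop base_state false data

-- ===== PORT B =====
-- the pmin array of Source B: pmin[0] = base_state+1, pmin[k+1] = min(pmin[k], vals[k]); length n+1
def pre_last_index_pmin (cur : Int) : List Int → List Int
  | [] => [cur]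
  | v :: rest => cur :: pre_last_index_pmin (min cur v) rest

-- the search of Source B: first key i with v > base_state and pmin[k] ≤ base_state, default -1
def pre_last_index_find (base_state : Int) : List (Int × Int) → List Int → Int
  | [], _ => -1
  | _ :: _, [] => -1
  | (i, v) :: rest, p :: ps =>
    if decide (v > base_state) && decide (p ≤ base_state) then i
    else pre_last_index_find base_state rest ps

def pre_last_index_alt (data : List (Int × Int)) (base_state : Int) : Int :=
  pre_last_index_find base_state data
    (pre_last_index_pmin (base_state + 1) (data.map Prod.snd))

-- ===== PRECONDITION & SPEC =====
def Spec_pre_last_index (data : List (Int × Int)) (base_state : Int) (out : Int) : Prop := out = pre_last_index_alt data base_state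
instance (data : List (Int × Int)) (base_state : Int) (out : Int) : Decidable (Spec_pre_last_index data base_state out) := by unfold Spec_pre_last_index; infer_instance

-- ===== CLAIM (what is proved, stated in full; the proofs are below) =====
def Claim_equal_pre_last_index : Prop := ∀ (data : List (Int × Int)) (base_state : Int), Dom_pre_last_index data base_state → Spec_pre_last_index data base_state (pre_last_index data base_state)

-- ===== LEMMAS AND PROOFS =====

-- invariant: A's flag equals "current prefix minimum ≤ base_state"
theorem loop_eq_find (b : Int) (l : List (Int × Int)) :
    ∀ (cur : Int),
      pre_last_index_loop b (decide (cur ≤ b)) l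
        = pre_last_index_find b l (pre_last_index_pmin cur (l.map Prod.snd)) := by
  induction l with
  | nil => intro cur; rfl
  | cons hd tl ih =>
    intro cur
    obtain ⟨i, v⟩ := hd
    have hw : (if (!(decide (cur ≤ b))) && decide (v ≤ b) then true else decide (cur ≤ b))
        = decide (min cur v ≤ b) := by
      by_cases h1 : cur ≤ b <;> by_cases h2 : v ≤ b <;> by_cases h3 : min cur v ≤ b <;> simp [h1, h2, h3] <;> omega
    simp only [pre_last_index_loop, pre_last_index_pmin, List.map, pre_last_index_find, hw]
    have hflag : (decide (cur ≤ b) || decide (v ≤ b)) = decide (min cur v ≤ b) := by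
      by_cases h1 : cur ≤ b <;> by_cases h2 : v ≤ b <;> by_cases h3 : min cur v ≤ b <;> simp [h1, h2, h3] <;> omega
    by_cases hv : v > b
    · have h2 : ¬ v ≤ b := not_le.mpr hv
      have hm : (min cur v ≤ b) ↔ (cur ≤ b) := by constructor <;> intro hx <;> [omega; exact le_trans (min_le_left _ _) hx]
      have hrec := ih (min cur v)
      rw [show (decide (min cur v ≤ b)) = decide (cur ≤ b) from by simp [hm]] at hrec
      simp [hm, hv, hrec]
    · simp [hv]
      rw [hflag]
      exact ih (min cur v)

-- ===== VERDICT =====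
theorem pre_last_index_spec : Claim_equal_pre_last_index := by
  intro data base_state _
  unfold Spec_pre_last_index pre_last_index pre_last_index_alt
  have hb : ¬ (base_state + 1 ≤ base_state) := by omega
  have := loop_eq_find base_state data (base_state + 1)
  simpa [hb] using this
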